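-- pv_equiv track=rewrite | github.com/newbie123232323232/monitest_1 | backend/app/services/monitor_service.py | is_status_code_accepted
-- ===== SOURCE A (Python) =====
-- class MonitorValidationError(Exception):
--     def __init__(self, message: str):
--         self.message = message
--         super().__init__(message)
--
-- def normalize_accepted_status_codes(raw: str) -> str:
--     value = (raw or "").strip()
--     if not value:
--         raise MonitorValidationError("accepted_status_codes is required")
--
--     tokens = [part.strip() for part in value.split(",") if part.strip()]
--     if not tokens:
--         raise MonitorValidationError("accepted_status_codes is invalid")
--
--     normalized: list[str] = []
--     for token in tokens:
--         if "-" in token: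
--             parts = token.split("-", 1)
--             if len(parts) != 2:
--                 raise MonitorValidationError(f"invalid status code range: {token}")
--             left, right = parts[0].strip(), parts[1].strip()
--             if not left.isdigit() or not right.isdigit():
--                 raise MonitorValidationError(f"invalid status code range: {token}")
--             start, end = int(left), int(right)
--             if start < 100 or end > 599 or start > end:
--                 raise MonitorValidationError(f"invalid status code range: {token}")
--             normalized.append(f"{start}-{end}")
--             continue
--
--         if not token.isdigit():
--             raise MonitorValidationError(f"invalid status code: {token}")
--         code = int(token)
--         if code < 100 or code > 599:
--             raise MonitorValidationError(f"invalid status code: {token}")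
--         normalized.append(str(code))
--
--     return ",".join(normalized)
--
-- def is_status_code_accepted(status_code: int, accepted_status_codes: str) -> bool:
--     if status_code < 100 or status_code > 599:
--         return False
--     normalized = normalize_accepted_status_codes(accepted_status_codes)
--     for token in normalized.split(","):
--         if "-" in token:
--             start_s, end_s = token.split("-", 1)
--             if int(start_s) <= status_code <= int(end_s):
--                 return True
--         elif status_code == int(token):
--             return True
--     return False
-- ===== SOURCE B (Python) =====
-- class MonitorValidationError(Exception):
--     def __init__(self, message: str):
--         self.message = message
--         super().__init__(message)
--
-- def is_status_code_accepted(status_code: int, accepted_status_codes: str) -> bool: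
--     if not (100 <= status_code <= 599):
--         return False
--     value = (accepted_status_codes or "").strip()
--     if not value:
--         raise MonitorValidationError("accepted_status_codes is required")
--     tokens = [part.strip() for part in value.split(",") if part.strip()]
--     if not tokens:
--         raise MonitorValidationError("accepted_status_codes is invalid")
--     accepted: set[int] = set()
--     for token in tokens:
--         if "-" in token:
--             left_s, right_s = token.split("-", 1)
--             left, right = left_s.strip(), right_s.strip()
--             if not left.isdigit() or not right.isdigit():
--                 raise MonitorValidationError(f"invalid status code range: {token}")
--             start, end = int(left), int(right)
--             if start < 100 or end > 599 or start > end: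
--                 raise MonitorValidationError(f"invalid status code range: {token}")
--             accepted.update(range(start, end + 1))
--         else:
--             if not token.isdigit():
--                 raise MonitorValidationError(f"invalid status code: {token}")
--             code = int(token)
--             if code < 100 or code > 599:
--                 raise MonitorValidationError(f"invalid status code: {token}")
--             accepted.add(code)
--     return status_code in accepted
-- ===== Notes on version B (the rewrite author's own statement) =====
-- stated objective: alternative
-- what changed: Instead of rebuilding a normalized spec string and re-splitting/re-parsing it in a second scan, B validates each token once and accumulates the accepted integer codes into a set (single code or range(start,end+1)), then answers by set membership; validation order and error messages are unchanged.
import Mathlib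
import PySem

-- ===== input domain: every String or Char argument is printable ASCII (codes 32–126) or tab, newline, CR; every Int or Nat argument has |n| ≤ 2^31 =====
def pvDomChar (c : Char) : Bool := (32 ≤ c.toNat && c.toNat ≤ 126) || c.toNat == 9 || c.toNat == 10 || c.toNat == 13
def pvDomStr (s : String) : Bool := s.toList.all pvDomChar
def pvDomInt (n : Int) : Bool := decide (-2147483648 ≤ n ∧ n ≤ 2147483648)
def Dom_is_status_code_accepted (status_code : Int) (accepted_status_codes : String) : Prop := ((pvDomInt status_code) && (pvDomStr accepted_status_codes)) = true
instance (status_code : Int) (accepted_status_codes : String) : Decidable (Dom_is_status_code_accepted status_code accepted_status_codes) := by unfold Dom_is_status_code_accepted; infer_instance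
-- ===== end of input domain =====

-- B replaces A's rebuild-a-normalized-string-then-rescan-and-reparse with one validation pass that
-- collects the accepted integer codes into a set and answers by membership (alternative decomposition,
-- same validation order); equivalence of the RETURN value is proved on Pre_ (where A raises no exception).

-- ===== PORT A =====
-- tokenization shared by both programs: stripped nonempty parts of value.split(",")
def pvTokens (value : List Char) : List (List Char) :=
  ((PySem.Chars.splitOn value [',']).map PySem.Chars.strip).filter (fun p => !p.isEmpty)

-- the validation/normalization loop of normalize_accepted_status_codes; `none` = MonitorValidationError
def pvNormGo : List (List Char) → List (List Char) → Option (List (List Char))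
  | [], acc => some acc
  | t :: rest, acc =>
    if PySem.Chars.isIn ['-'] t then
      match PySem.Chars.splitOnMax t ['-'] 1 with
      | [l, r] =>
        let left := PySem.Chars.strip l
        let right := PySem.Chars.strip r
        if !PySem.Chars.strIsdigit left || !PySem.Chars.strIsdigit right then none
        else
          -- int(left)/int(right): isdigit guarantees the parse, getD 0 is never taken
          let start := (PySem.Int.ofChars? left).getD 0
          let end_ := (PySem.Int.ofChars? right).getD 0
          if start < 100 ∨ end_ > 599 ∨ start > end_ then none
          else pvNormGo rest (acc ++ [PySem.Int.toChars start ++ '-' :: PySem.Int.toChars end_])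
      | _ => none   -- len(parts) != 2 (unreachable when '-' ∈ t)
    else
      if !PySem.Chars.strIsdigit t then none
      else
        let code := (PySem.Int.ofChars? t).getD 0
        if code < 100 ∨ code > 599 then none
        else pvNormGo rest (acc ++ [PySem.Int.toChars code])

-- normalize_accepted_status_codes; `none` = MonitorValidationError
def pvNormalize (raw : String) : Option (List Char) :=
  let value := PySem.Chars.strip raw.toList
  if value.isEmpty then none
  else
    let tokens := pvTokens value
    if tokens.isEmpty then none
    else (pvNormGo tokens []).map (PySem.Chars.join [','])

-- the scan loop of is_status_code_accepted over normalized.split(",")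
def pvLoopA (sc : Int) : List (List Char) → Bool
  | [] => false
  | token :: rest =>
    if PySem.Chars.isIn ['-'] token then
      match PySem.Chars.splitOnMax token ['-'] 1 with
      | [start_s, end_s] =>
        if (PySem.Int.ofChars? start_s).getD 0 ≤ sc ∧ sc ≤ (PySem.Int.ofChars? end_s).getD 0 then true
        else pvLoopA sc rest
      | _ => pvLoopA sc rest  -- unpack of ≠ 2 parts (unreachable when '-' ∈ token)
    else
      if sc == (PySem.Int.ofChars? token).getD 0 then true
      else pvLoopA sc rest

def is_status_code_accepted (status_code : Int) (accepted_status_codes : String) : Bool :=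
  if status_code < 100 ∨ status_code > 599 then false
  else
    match pvNormalize accepted_status_codes with
    | none => false   -- Python raises MonitorValidationError here; excluded by Pre_
    | some normalized => pvLoopA status_code (PySem.Chars.splitOn normalized [','])

-- ===== PORT B =====
-- B's single pass: validate each token and accumulate the accepted codes into a set; `none` = error
def pvBuildGo : List (List Char) → PySem.Set Int → Option (PySem.Set Int)
  | [], acc => some acc
  | t :: rest, acc =>
    if PySem.Chars.isIn ['-'] t then
      match PySem.Chars.splitOnMax t ['-'] 1 with
      | [l, r] =>
        let left := PySem.Chars.strip l
        let right := PySem.Chars.strip r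
        if !PySem.Chars.strIsdigit left || !PySem.Chars.strIsdigit right then none
        else
          let start := (PySem.Int.ofChars? left).getD 0
          let end_ := (PySem.Int.ofChars? right).getD 0
          if start < 100 ∨ end_ > 599 ∨ start > end_ then none
          else pvBuildGo rest (PySem.Set.update acc (PySem.List.pyRange start (end_ + 1) 1))
      | _ => none
    else
      if !PySem.Chars.strIsdigit t then none
      else
        let code := (PySem.Int.ofChars? t).getD 0
        if code < 100 ∨ code > 599 then none
        else pvBuildGo rest (PySem.Set.add acc code)

def is_status_code_accepted_alt (status_code : Int) (accepted_status_codes : String) : Bool :=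
  if !(100 ≤ status_code ∧ status_code ≤ 599) then false
  else
    let value := PySem.Chars.strip accepted_status_codes.toList
    if value.isEmpty then false   -- B raises MonitorValidationError here; excluded by Pre_
    else
      let tokens := pvTokens value
      if tokens.isEmpty then false   -- B raises; excluded by Pre_
      else
        match pvBuildGo tokens PySem.Set.empty with
        | none => false   -- B raises; excluded by Pre_
        | some accepted => PySem.Set.contains accepted status_code

-- ===== PRECONDITION & SPEC =====
-- a single spec token raises no MonitorValidationError: "ddd" or "ddd-ddd" within 100..599
def pvValidTok (t : List Char) : Bool :=
  if PySem.Chars.isIn ['-'] t then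
    match PySem.Chars.splitOnMax t ['-'] 1 with
    | [l, r] =>
      PySem.Chars.strIsdigit (PySem.Chars.strip l) && PySem.Chars.strIsdigit (PySem.Chars.strip r) &&
      decide (100 ≤ (PySem.Int.ofChars? (PySem.Chars.strip l)).getD 0 ∧
              (PySem.Int.ofChars? (PySem.Chars.strip r)).getD 0 ≤ 599 ∧
              (PySem.Int.ofChars? (PySem.Chars.strip l)).getD 0 ≤ (PySem.Int.ofChars? (PySem.Chars.strip r)).getD 0)
    | _ => false
  else
    PySem.Chars.strIsdigit t &&
    decide (100 ≤ (PySem.Int.ofChars? t).getD 0 ∧ (PySem.Int.ofChars? t).getD 0 ≤ 599)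

-- Pre_ excludes exactly the inputs where A raises MonitorValidationError: status_code inside 100..599
-- together with a spec string that strips to empty, yields no tokens, or has an invalid token.
def Pre_is_status_code_accepted (status_code : Int) (accepted_status_codes : String) : Prop :=
  status_code < 100 ∨ 599 < status_code ∨
  (PySem.Chars.strip accepted_status_codes.toList ≠ [] ∧
   pvTokens (PySem.Chars.strip accepted_status_codes.toList) ≠ [] ∧
   ∀ t ∈ pvTokens (PySem.Chars.strip accepted_status_codes.toList), pvValidTok t = true)
instance (status_code : Int) (accepted_status_codes : String) : Decidable (Pre_is_status_code_accepted status_code accepted_status_codes) := by unfold Pre_is_status_code_accepted; infer_instance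

def pvWitness_is_status_code_accepted : Int × String := (250, "200, 300-450,500")

def Spec_is_status_code_accepted (status_code : Int) (accepted_status_codes : String) (out : Bool) : Prop := out = is_status_code_accepted_alt status_code accepted_status_codes
instance (status_code : Int) (accepted_status_codes : String) (out : Bool) : Decidable (Spec_is_status_code_accepted status_code accepted_status_codes out) := by unfold Spec_is_status_code_accepted; infer_instance

-- ===== CLAIM (what is proved, stated in full; the proofs are below) =====
def Claim_equal_is_status_code_accepted : Prop := ∀ (status_code : Int) (accepted_status_codes : String), Dom_is_status_code_accepted status_code accepted_status_codes → Pre_is_status_code_accepted status_code accepted_status_codes → Spec_is_status_code_accepted status_code accepted_status_codes (is_status_code_accepted status_code accepted_status_codes)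

-- ===== LEMMAS AND PROOFS =====

-- proof-side projections of a valid token
def pvStartOf (t : List Char) : Int :=
  match PySem.Chars.splitOnMax t ['-'] 1 with
  | [l, _] => (PySem.Int.ofChars? (PySem.Chars.strip l)).getD 0
  | _ => 0
def pvEndOf (t : List Char) : Int :=
  match PySem.Chars.splitOnMax t ['-'] 1 with
  | [_, r] => (PySem.Int.ofChars? (PySem.Chars.strip r)).getD 0
  | _ => 0
def pvCodeOf (t : List Char) : Int := (PySem.Int.ofChars? t).getD 0

-- the normalized string a valid token contributes
def pvNormTok (t : List Char) : List Char :=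
  if PySem.Chars.isIn ['-'] t then PySem.Int.toChars (pvStartOf t) ++ '-' :: PySem.Int.toChars (pvEndOf t)
  else PySem.Int.toChars (pvCodeOf t)

-- whether status_code sc matches a valid token
def pvMatch (sc : Int) (t : List Char) : Bool :=
  if PySem.Chars.isIn ['-'] t then decide (pvStartOf t ≤ sc ∧ sc ≤ pvEndOf t) else sc == pvCodeOf t

-- str(n) contains only digit characters: neither '-' nor ','
theorem pv_digitChar_ne : ∀ k ∈ List.range 10, Nat.digitChar k ≠ '-' ∧ Nat.digitChar k ≠ ',' := by
  decide

theorem pv_toDigitsCore_mem : ∀ (f n : Nat) (l : List Char) (c : Char),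
    c ∈ Nat.toDigitsCore 10 f n l → c ∈ l ∨ ∃ k, k < 10 ∧ c = Nat.digitChar k := by
  intro f
  induction f with
  | zero => intro n l c h; exact Or.inl h
  | succ f ih =>
    intro n l c h
    rw [Nat.toDigitsCore] at h
    by_cases hd : n / 10 = 0
    · rw [if_pos hd] at h
      rcases List.mem_cons.mp h with h1 | h2
      · exact Or.inr ⟨n % 10, by omega, h1⟩
      · exact Or.inl h2
    · rw [if_neg hd] at h
      rcases ih (n / 10) (Nat.digitChar (n % 10) :: l) c h with h1 | h2
      · rcases List.mem_cons.mp h1 with h3 | h4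
        · exact Or.inr ⟨n % 10, by omega, h3⟩
        · exact Or.inl h4
      · exact Or.inr h2

theorem pv_toChars_ne (n : Int) (h0 : 0 ≤ n) : '-' ∉ PySem.Int.toChars n ∧ ',' ∉ PySem.Int.toChars n := by
  unfold PySem.Int.toChars
  rw [if_neg (by omega)]
  unfold Nat.toDigits
  constructor <;> intro hm <;>
    rcases pv_toDigitsCore_mem _ _ [] _ hm with h1 | ⟨k, hk10, hk⟩
  · exact absurd h1 (List.not_mem_nil)
  · exact (pv_digitChar_ne k (List.mem_range.mpr hk10)).1 hk.symm
  · exact absurd h1 (List.not_mem_nil)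
  · exact (pv_digitChar_ne k (List.mem_range.mpr hk10)).2 hk.symm

-- int(str(n)) = n for n in 100..599, by kernel evaluation
set_option maxRecDepth 40000 in
theorem pv_roundtrip_digits : ∀ k ∈ List.range 500,
    PySem.Int.ofChars? (PySem.Int.toChars (100 + (k : Int))) = some (100 + (k : Int)) := by
  decide

theorem pv_toChars_facts' (n : Int) (h1 : 100 ≤ n) (h2 : n ≤ 599) :
    PySem.Int.ofChars? (PySem.Int.toChars n) = some n ∧
    '-' ∉ PySem.Int.toChars n ∧ ',' ∉ PySem.Int.toChars n := by
  have hk := pv_roundtrip_digits (n - 100).toNat (List.mem_range.mpr (by omega))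
  rw [show (100 + ((n - 100).toNat : Int)) = n by omega] at hk
  exact ⟨hk, pv_toChars_ne n (by omega)⟩

-- ---- splitOn bridge to Mathlib's List.splitOn, for a one-char separator ----
theorem pv_splitOn_go (c : Char) :
    ∀ (fuel : Nat) (l cur : List Char) (accs : List (List Char)), l.length ≤ fuel →
      PySem.Chars.splitOn.go [c] fuel l cur accs =
        accs.reverse ++ (List.splitOn c l).modifyHead (cur.reverse ++ ·) := by
  intro fuel
  induction fuel with
  | zero =>
    intro l cur accs h
    have hl : l = [] := by cases l <;> simp_all
    subst hl
    simp [PySem.Chars.splitOn.go, List.splitOn]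
  | succ fuel ih =>
    intro l cur accs h
    cases l with
    | nil => simp [PySem.Chars.splitOn.go, List.splitOn]
    | cons ch rest =>
      rw [PySem.Chars.splitOn.go]
      by_cases hc : c = ch
      · subst hc
        have hpre : List.isPrefixOf [c] (c :: rest) = true := by
          simp [List.isPrefixOf]
        rw [if_pos hpre]
        simp only [List.length_singleton, List.drop_one, List.tail_cons]
        rw [ih rest [] (cur.reverse :: accs) (by simpa using Nat.le_of_succ_le_succ h)]
        simp [List.splitOn, List.splitOnP_cons, List.modifyHead]
        cases List.splitOnP (fun x => x == c) rest <;> simp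
      · have hpre : List.isPrefixOf [c] (ch :: rest) = false := by
          simp [List.isPrefixOf]
          exact fun h' => absurd h' hc
        rw [if_neg (by simp [hpre])]
        rw [ih rest (ch :: cur) accs (by simpa using Nat.le_of_succ_le_succ h)]
        simp only [List.splitOn, List.splitOnP_cons]
        have : (ch == c) = false := by simp; exact fun h' => absurd h'.symm hc
        rw [this]
        simp only [if_neg (by simp : ¬ (false = true))]
        rw [List.modifyHead_modifyHead]
        congr 1
        cases List.splitOnP (fun x => x == c) rest <;> simp [List.modifyHead]

theorem pv_splitOn_single (c : Char) (l : List Char) :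
    PySem.Chars.splitOn l [c] = List.splitOn c l := by
  rw [PySem.Chars.splitOn, pv_splitOn_go c (l.length + 1) l [] [] (by omega)]
  cases hsp : List.splitOn c l <;> simp [List.modifyHead]

theorem pv_roundtrip (parts : List (List Char)) (h : parts ≠ []) (hc : ∀ p ∈ parts, ',' ∉ p) :
    PySem.Chars.splitOn (PySem.Chars.join [','] parts) [','] = parts := by
  have hj : PySem.Chars.join [','] parts = [','].intercalate parts := rfl
  rw [hj, pv_splitOn_single, List.splitOn_intercalate (x := ',') (hx := hc) (hls := h)]

-- ---- splitOnMax with maxsplit 1 on p ++ '-' :: q where '-' ∉ p ----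
theorem pv_splitOnMax_go_zero :
    ∀ (fuel : Nat) (l cur : List Char) (accs : List (List Char)),
      PySem.Chars.splitOnMax.go ['-'] fuel 0 l cur accs = ((cur.reverse ++ l) :: accs).reverse := by
  intro fuel l cur accs
  cases fuel <;> cases l <;> simp [PySem.Chars.splitOnMax.go]

theorem pv_splitOnMax_go_dash :
    ∀ (p : List Char), '-' ∉ p → ∀ (fuel : Nat) (q cur : List Char) (accs : List (List Char)),
      (p ++ '-' :: q).length ≤ fuel →
      PySem.Chars.splitOnMax.go ['-'] fuel 1 (p ++ '-' :: q) cur accs =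
        accs.reverse ++ [cur.reverse ++ p, q] := by
  intro p
  induction p with
  | nil =>
    intro _ fuel q cur accs h
    cases fuel with
    | zero => simp at h
    | succ fuel =>
      rw [List.nil_append, PySem.Chars.splitOnMax.go]
      rw [if_neg (by omega)]
      rw [if_pos (by simp [List.isPrefixOf])]
      simp only [List.length_singleton, List.drop_one, List.tail_cons]
      rw [show (1 : Nat) - 1 = 0 by omega, pv_splitOnMax_go_zero]
      simp
  | cons ch p ihp =>
    intro hmem fuel q cur accs h
    cases fuel with
    | zero => simp at h
    | succ fuel =>
      rw [List.cons_append, PySem.Chars.splitOnMax.go]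
      rw [if_neg (by omega)]
      have hch : ch ≠ '-' := by intro he; exact hmem (by simp [he])
      rw [if_neg (by simp [List.isPrefixOf]; exact fun h' => absurd h'.symm hch)]
      rw [ihp (fun hm => hmem (List.mem_cons_of_mem _ hm)) fuel q (ch :: cur) accs
        (by simp at h ⊢; omega)]
      simp

theorem pv_splitOnMax_dash (p q : List Char) (hp : '-' ∉ p) :
    PySem.Chars.splitOnMax (p ++ '-' :: q) ['-'] 1 = [p, q] := by
  rw [PySem.Chars.splitOnMax]
  rw [if_neg (by omega)]
  rw [show (1 : Int).toNat = 1 from rfl]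
  rw [pv_splitOnMax_go_dash p hp _ q [] [] (by omega)]
  simp

-- ---- characterization of the two per-token folds ----
theorem pv_valid_bounds (t : List Char) (h : pvValidTok t = true) :
    (PySem.Chars.isIn ['-'] t = true → 100 ≤ pvStartOf t ∧ pvStartOf t ≤ pvEndOf t ∧ pvEndOf t ≤ 599) ∧
    (PySem.Chars.isIn ['-'] t = false → 100 ≤ pvCodeOf t ∧ pvCodeOf t ≤ 599) := by
  unfold pvValidTok at h
  constructor
  · intro hd
    rw [hd, if_pos rfl] at h
    unfold pvStartOf pvEndOf
    cases hsp : PySem.Chars.splitOnMax t ['-'] 1 with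
    | nil => rw [hsp] at h; simp at h
    | cons a tl =>
      cases tl with
      | nil => rw [hsp] at h; simp at h
      | cons b tl2 =>
        cases tl2 with
        | nil =>
          rw [hsp] at h
          simp only [Bool.and_eq_true, decide_eq_true_eq] at h
          simp only []
          omega
        | cons c tl3 => rw [hsp] at h; simp at h
  · intro hd
    rw [hd] at h
    simp only [Bool.false_eq_true, if_false, Bool.and_eq_true, decide_eq_true_eq] at h
    unfold pvCodeOf
    omega

theorem pv_normGo_some (tokens : List (List Char)) (h : ∀ t ∈ tokens, pvValidTok t = true) :
    ∀ acc, pvNormGo tokens acc = some (acc ++ tokens.map pvNormTok) := by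
  induction tokens with
  | nil => intro acc; simp [pvNormGo]
  | cons t rest ih =>
    intro acc
    have ht := h t (by simp)
    have hb := pv_valid_bounds t ht
    unfold pvValidTok at ht
    rw [pvNormGo]
    by_cases hd : PySem.Chars.isIn ['-'] t = true
    · rw [hd, if_pos rfl] at ht ⊢
      cases hsp : PySem.Chars.splitOnMax t ['-'] 1 with
      | nil => rw [hsp] at ht; simp at ht
      | cons a tl =>
        cases tl with
        | nil => rw [hsp] at ht; simp at ht
        | cons b tl2 =>
          cases tl2 with
          | nil =>
            rw [hsp] at ht
            simp only [Bool.and_eq_true, decide_eq_true_eq] at ht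
            simp only [ht.1.1, ht.1.2, Bool.not_true, Bool.or_self, Bool.false_eq_true, if_false]
            rw [if_neg (by omega)]
            rw [ih (fun x hx => h x (by simp [hx]))]
            congr 1
            have hnt : pvNormTok t = PySem.Int.toChars (pvStartOf t) ++ '-' :: PySem.Int.toChars (pvEndOf t) := by
              unfold pvNormTok; rw [hd, if_pos rfl]
            rw [List.map_cons, hnt]
            unfold pvStartOf pvEndOf
            simp only [hsp]
            simp
          | cons c tl3 => rw [hsp] at ht; simp at ht
    · simp only [Bool.not_eq_true] at hd
      rw [hd] at ht ⊢
      simp only [Bool.false_eq_true, if_false] at ht ⊢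
      simp only [Bool.and_eq_true, decide_eq_true_eq] at ht
      rw [if_neg (by simp [ht.1])]
      rw [if_neg (by omega)]
      rw [ih (fun x hx => h x (by simp [hx]))]
      congr 1
      have hnt : pvNormTok t = PySem.Int.toChars (pvCodeOf t) := by
        unfold pvNormTok; rw [hd]; simp
      rw [List.map_cons, hnt]
      unfold pvCodeOf
      simp

-- [x] is an infix of l iff x is an element
theorem pv_singleton_infix (x : Char) (l : List Char) : [x] <:+: l ↔ x ∈ l := by
  constructor
  · rintro ⟨s, t, rfl⟩; simp
  · intro hm
    obtain ⟨s, t, rfl⟩ := List.append_of_mem hm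
    exact ⟨s, t, by simp⟩

theorem pv_loopA_map (sc : Int) (tokens : List (List Char)) (h : ∀ t ∈ tokens, pvValidTok t = true) :
    pvLoopA sc (tokens.map pvNormTok) = tokens.any (pvMatch sc) := by
  induction tokens with
  | nil => simp [pvLoopA]
  | cons t rest ih =>
    have ht := h t (by simp)
    have hb := pv_valid_bounds t ht
    rw [List.map_cons, List.any_cons, ← ih (fun x hx => h x (by simp [hx]))]
    by_cases hd : PySem.Chars.isIn ['-'] t = true
    · obtain ⟨hs1, hse, he1⟩ := hb.1 hd
      have hsf := pv_toChars_facts' (pvStartOf t) hs1 (by omega)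
      have hef := pv_toChars_facts' (pvEndOf t) (by omega) he1
      have hnt : pvNormTok t = PySem.Int.toChars (pvStartOf t) ++ '-' :: PySem.Int.toChars (pvEndOf t) := by
        unfold pvNormTok; rw [hd, if_pos rfl]
      have hm : pvMatch sc t = decide (pvStartOf t ≤ sc ∧ sc ≤ pvEndOf t) := by
        unfold pvMatch; rw [hd, if_pos rfl]
      rw [pvLoopA, hnt]
      have hin : PySem.Chars.isIn ['-'] (PySem.Int.toChars (pvStartOf t) ++ '-' :: PySem.Int.toChars (pvEndOf t)) = true := by
        rw [PySem.Chars.isIn_iff_infix]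
        exact (pv_singleton_infix _ _).mpr (by simp)
      rw [hin, if_pos rfl]
      rw [pv_splitOnMax_dash _ _ hsf.2.1]
      simp only []
      rw [hsf.1, hef.1]
      simp only [Option.getD_some]
      by_cases hcond : pvStartOf t ≤ sc ∧ sc ≤ pvEndOf t
      · rw [if_pos hcond, hm, decide_eq_true hcond]; simp
      · rw [if_neg hcond, hm, decide_eq_false hcond]; simp
    · simp only [Bool.not_eq_true] at hd
      obtain ⟨hc1, hc2⟩ := hb.2 hd
      have hcf := pv_toChars_facts' (pvCodeOf t) hc1 hc2
      have hnt : pvNormTok t = PySem.Int.toChars (pvCodeOf t) := by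
        unfold pvNormTok; rw [hd]; simp
      have hm : pvMatch sc t = (sc == pvCodeOf t) := by
        unfold pvMatch; rw [hd]; simp
      rw [pvLoopA, hnt]
      have hin : PySem.Chars.isIn ['-'] (PySem.Int.toChars (pvCodeOf t)) = false := by
        rw [PySem.Chars.isIn_eq_false_iff]
        rw [pv_singleton_infix]
        exact hcf.2.1
      rw [hin]
      simp only [Bool.false_eq_true, if_false]
      rw [hcf.1]
      simp only [Option.getD_some]
      by_cases hcond : sc = pvCodeOf t
      · rw [if_pos (by simp [hcond]), hm]; simp [hcond]
      · rw [if_neg (by simp [hcond]), hm]; simp [hcond]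

theorem pv_buildGo_some (sc : Int) (tokens : List (List Char)) (h : ∀ t ∈ tokens, pvValidTok t = true) :
    ∀ acc : PySem.Set Int, ∃ s, pvBuildGo tokens acc = some s ∧
      (sc ∈ s ↔ sc ∈ acc ∨ ∃ t ∈ tokens, pvMatch sc t = true) := by
  induction tokens with
  | nil => intro acc; exact ⟨acc, rfl, by simp⟩
  | cons t rest ih =>
    intro acc
    have ht := h t (by simp)
    have hb := pv_valid_bounds t ht
    unfold pvValidTok at ht
    rw [pvBuildGo]
    by_cases hd : PySem.Chars.isIn ['-'] t = true
    · obtain ⟨hs1, hse, he1⟩ := hb.1 hd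
      rw [hd, if_pos rfl] at ht ⊢
      cases hsp : PySem.Chars.splitOnMax t ['-'] 1 with
      | nil => rw [hsp] at ht; simp at ht
      | cons a tl =>
        cases tl with
        | nil => rw [hsp] at ht; simp at ht
        | cons b tl2 =>
          cases tl2 with
          | nil =>
            rw [hsp] at ht
            simp only [Bool.and_eq_true, decide_eq_true_eq] at ht
            simp only [ht.1.1, ht.1.2, Bool.not_true, Bool.or_self, Bool.false_eq_true, if_false]
            rw [if_neg (by omega)]
            obtain ⟨s, hs, hmem⟩ := ih (fun x hx => h x (by simp [hx]))
              (PySem.Set.update acc (PySem.List.pyRange ((PySem.Int.ofChars? (PySem.Chars.strip a)).getD 0) ((PySem.Int.ofChars? (PySem.Chars.strip b)).getD 0 + 1) 1))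
            refine ⟨s, hs, ?_⟩
            rw [hmem, PySem.Set.mem_update, PySem.List.mem_pyRange_one]
            have hst : pvStartOf t = (PySem.Int.ofChars? (PySem.Chars.strip a)).getD 0 := by
              unfold pvStartOf; rw [hsp]
            have het : pvEndOf t = (PySem.Int.ofChars? (PySem.Chars.strip b)).getD 0 := by
              unfold pvEndOf; rw [hsp]
            have hm : pvMatch sc t = decide (pvStartOf t ≤ sc ∧ sc ≤ pvEndOf t) := by
              unfold pvMatch; rw [hd, if_pos rfl]
            constructor
            · rintro ((hacc | hr) | ⟨x, hx, hpx⟩)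
              · exact Or.inl hacc
              · exact Or.inr ⟨t, by simp, by rw [hm]; exact decide_eq_true (by omega)⟩
              · exact Or.inr ⟨x, by simp [hx], hpx⟩
            · rintro (hacc | ⟨x, hx, hpx⟩)
              · exact Or.inl (Or.inl hacc)
              · rcases List.mem_cons.mp hx with h1 | h2
                · subst h1
                  rw [hm] at hpx
                  have := of_decide_eq_true hpx
                  exact Or.inl (Or.inr (by omega))
                · exact Or.inr ⟨x, h2, hpx⟩
          | cons c tl3 => rw [hsp] at ht; simp at ht
    · simp only [Bool.not_eq_true] at hd
      obtain ⟨hc1, hc2⟩ := hb.2 hd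
      rw [hd] at ht ⊢
      simp only [Bool.false_eq_true, if_false] at ht ⊢
      simp only [Bool.and_eq_true, decide_eq_true_eq] at ht
      rw [if_neg (by simp [ht.1])]
      rw [if_neg (by omega)]
      obtain ⟨s, hs, hmem⟩ := ih (fun x hx => h x (by simp [hx]))
        (PySem.Set.add acc ((PySem.Int.ofChars? t).getD 0))
      refine ⟨s, hs, ?_⟩
      rw [hmem, PySem.Set.mem_add]
      have hm : pvMatch sc t = (sc == pvCodeOf t) := by
        unfold pvMatch; rw [hd]; simp
      constructor
      · rintro ((hacc | hr) | ⟨x, hx, hpx⟩)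
        · exact Or.inl hacc
        · exact Or.inr ⟨t, by simp, by rw [hm]; unfold pvCodeOf; simp [hr]⟩
        · exact Or.inr ⟨x, by simp [hx], hpx⟩
      · rintro (hacc | ⟨x, hx, hpx⟩)
        · exact Or.inl (Or.inl hacc)
        · rcases List.mem_cons.mp hx with h1 | h2
          · subst h1
            rw [hm] at hpx
            unfold pvCodeOf at hpx
            exact Or.inl (Or.inr (by exact of_decide_eq_true hpx))
          · exact Or.inr ⟨x, h2, hpx⟩

theorem pv_normTok_comma_free (t : List Char) (h : pvValidTok t = true) : ',' ∉ pvNormTok t := by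
  have hb := pv_valid_bounds t h
  by_cases hd : PySem.Chars.isIn ['-'] t = true
  · obtain ⟨hs1, hse, he1⟩ := hb.1 hd
    have hsf := pv_toChars_facts' (pvStartOf t) hs1 (by omega)
    have hef := pv_toChars_facts' (pvEndOf t) (by omega) he1
    unfold pvNormTok
    rw [hd, if_pos rfl]
    intro hm
    rcases List.mem_append.mp hm with h1 | h2
    · exact hsf.2.2 h1
    · rcases List.mem_cons.mp h2 with h3 | h4
      · exact absurd h3 (by decide)
      · exact hef.2.2 h4
  · simp only [Bool.not_eq_true] at hd
    obtain ⟨hc1, hc2⟩ := hb.2 hd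
    have hcf := pv_toChars_facts' (pvCodeOf t) hc1 hc2
    unfold pvNormTok
    rw [hd]
    simpa using hcf.2.2

-- ===== VERDICT (by name: the statement is the Claim_ definition above) =====
theorem is_status_code_accepted_spec : Claim_equal_is_status_code_accepted := by
  intro sc s _ hpre
  unfold Spec_is_status_code_accepted is_status_code_accepted is_status_code_accepted_alt
  by_cases hg : sc < 100 ∨ sc > 599
  · have hgB : (!decide (100 ≤ sc ∧ sc ≤ 599)) = true := by
      simp only [Bool.not_eq_true', decide_eq_false_iff_not]; omega
    rw [if_pos hg, hgB, if_pos rfl]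
  · have h100 : 100 ≤ sc := by omega
    have h599 : sc ≤ 599 := by omega
    rcases hpre with h | h | ⟨hne, htok, hval⟩
    · omega
    · omega
    · have h1 : (PySem.Chars.strip s.toList).isEmpty = false := by
        cases hc : PySem.Chars.strip s.toList with
        | nil => exact absurd hc hne
        | cons a l => rfl
      have h2 : (pvTokens (PySem.Chars.strip s.toList)).isEmpty = false := by
        cases hc : pvTokens (PySem.Chars.strip s.toList) with
        | nil => exact absurd hc htok
        | cons a l => rfl
      have hgB : (!decide (100 ≤ sc ∧ sc ≤ 599)) = false := by
        simp only [Bool.not_eq_false', decide_eq_true_eq]; exact ⟨h100, h599⟩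
      rw [if_neg (by omega), hgB]
      simp only [Bool.false_eq_true, if_false]
      rw [pvNormalize]
      simp only [h1, Bool.false_eq_true, if_false, h2]
      rw [pv_normGo_some _ hval []]
      simp only [List.nil_append, Option.map_some]
      have hparts_ne : (pvTokens (PySem.Chars.strip s.toList)).map pvNormTok ≠ [] := by
        simpa using htok
      have hparts_cf : ∀ p ∈ (pvTokens (PySem.Chars.strip s.toList)).map pvNormTok, ',' ∉ p := by
        intro p hp
        obtain ⟨t, htm, rfl⟩ := List.mem_map.mp hp
        exact pv_normTok_comma_free t (hval t htm)
      obtain ⟨st, hst, hmem⟩ := pv_buildGo_some sc _ hval PySem.Set.empty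
      rw [hst]
      simp only []
      rw [pv_roundtrip _ hparts_ne hparts_cf, pv_loopA_map sc _ hval]
      rw [Bool.eq_iff_iff, List.any_eq_true, PySem.Set.contains_iff, hmem]
      constructor
      · rintro ⟨x, hx, hpx⟩; exact Or.inr ⟨x, hx, hpx⟩
      · rintro (habs | hx)
        · exact absurd habs (by simp [PySem.Set.empty])
        · exact hx
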